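-- pv_equiv track=rewrite | github.com/ltzp/LeetCode | 牛客网练习/纸牌游戏.py | solve
-- ===== SOURCE A (Python) =====
-- def solve(values):
--     values = sorted(values)
--     i = len(values) - 1
--     result = 0
--     while i >= 0:
--         if i - 1 >= 0:
--             result += values[i] - values[i - 1]
--         else:
--             result += values[i]
--         i -= 2
--     return result
-- ===== SOURCE B (Python) =====
-- def solve(values):
--     # Single ascending pass with a sign-flipping accumulator: processing the
--     # sorted values from smallest to largest, acc = v - acc yields the
--     # alternating-from-largest sum (no indices, no parity, no pairing branch).
--     acc = 0
--     for v in sorted(values):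
--         acc = v - acc
--     return acc
-- ===== Notes on version B (the rewrite author's own statement) =====
-- stated objective: simpler
-- what changed: Replaced A's descending step-by-2 index loop (pairing values[i]-values[i-1] with an odd-tail branch) by a single ascending pass over sorted(values) with the sign-flipping accumulator acc = v - acc, which needs no indices, no parity reasoning and no branches.
import Mathlib
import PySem

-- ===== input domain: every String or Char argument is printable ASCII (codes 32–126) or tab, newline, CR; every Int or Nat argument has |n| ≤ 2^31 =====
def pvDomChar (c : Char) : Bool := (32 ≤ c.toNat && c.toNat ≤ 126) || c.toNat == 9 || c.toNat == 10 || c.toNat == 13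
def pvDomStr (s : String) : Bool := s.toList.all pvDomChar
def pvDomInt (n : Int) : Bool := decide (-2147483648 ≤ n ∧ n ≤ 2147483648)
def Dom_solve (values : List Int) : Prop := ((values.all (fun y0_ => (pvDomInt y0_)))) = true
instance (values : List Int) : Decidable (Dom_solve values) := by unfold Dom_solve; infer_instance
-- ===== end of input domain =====

-- B is simpler: one ascending pass over the sorted list with the sign-flipping
-- accumulator acc = v - acc, instead of A's descending step-by-2 index loop
-- with an odd-tail branch.

-- ===== PORT A =====
-- A's while loop: i counts down by 2; indices are always in range when called from solve,
-- so pyGetD's default is never used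
def solveLoop (values : List Int) (i : Int) (result : Int) : Int :=
  if i ≥ 0 then
    if i - 1 ≥ 0 then
      solveLoop values (i - 2) (result + (PySem.List.pyGetD values i 0 - PySem.List.pyGetD values (i - 1) 0))
    else
      solveLoop values (i - 2) (result + PySem.List.pyGetD values i 0)
  else result
termination_by (i + 1).toNat
decreasing_by all_goals omega

def solve (values : List Int) : Int :=
  let values := PySem.List.sorted values id
  solveLoop values ((values.length : Int) - 1) 0

-- ===== PORT B =====
def solve_alt (values : List Int) : Int :=
  (PySem.List.sorted values id).foldl (fun acc v => v - acc) 0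

-- ===== PRECONDITION & SPEC =====
def Spec_solve (values : List Int) (out : Int) : Prop := out = solve_alt values
instance (values : List Int) (out : Int) : Decidable (Spec_solve values out) := by unfold Spec_solve; infer_instance

-- ===== CLAIM (what is proved, stated in full; the proofs are below) =====
def Claim_equal_solve : Prop := ∀ (values : List Int), Dom_solve values → Spec_solve values (solve values)

-- ===== LEMMAS AND PROOFS =====

-- mathematical alternating sum of a list (largest element first)
def altsum : List Int → Int
  | [] => 0
  | [a] => a
  | a :: b :: t => a - b + altsum t

-- one-step unfoldings of A's loop
theorem solveLoop_pair (v : List Int) (i r : Int) (h1 : i - 1 ≥ 0) :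
    solveLoop v i r = solveLoop v (i - 2) (r + (PySem.List.pyGetD v i 0 - PySem.List.pyGetD v (i - 1) 0)) := by
  rw [solveLoop, if_pos (show i ≥ 0 by omega), if_pos h1]

theorem solveLoop_last (v : List Int) (i r : Int) (hi : i ≥ 0) (h1 : ¬ i - 1 ≥ 0) :
    solveLoop v i r = solveLoop v (i - 2) (r + PySem.List.pyGetD v i 0) := by
  rw [solveLoop, if_pos hi, if_neg h1]

theorem solveLoop_done (v : List Int) (i r : Int) (hi : ¬ i ≥ 0) :
    solveLoop v i r = r := by
  rw [solveLoop, if_neg hi]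

-- the loop only looks at indices ≤ i, so a suffix past index i is irrelevant
theorem solveLoop_append (t u : List Int) : ∀ (i r : Int), i < t.length →
    solveLoop (t ++ u) i r = solveLoop t i r := by
  have hget : ∀ j : Int, 0 ≤ j → j < t.length →
      PySem.List.pyGetD (t ++ u) j 0 = PySem.List.pyGetD t j 0 := by
    intro j hj hjl
    rw [PySem.List.pyGetD_eq_getElem _ _ hj (by simp; omega),
        PySem.List.pyGetD_eq_getElem _ _ hj (by omega)]
    exact List.getElem_append_left (by omega)
  have key : ∀ (n : Nat) (i r : Int), (i+1).toNat ≤ n → i < t.length →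
      solveLoop (t ++ u) i r = solveLoop t i r := by
    intro n
    induction n with
    | zero =>
      intro i r hn _
      rw [solveLoop_done _ _ _ (by omega), solveLoop_done _ _ _ (by omega)]
    | succ n ih =>
      intro i r hn hlt
      by_cases hi : i ≥ 0
      · by_cases h1 : i - 1 ≥ 0
        · rw [solveLoop_pair _ _ _ h1, solveLoop_pair _ _ _ h1,
            hget i hi hlt, hget (i-1) (by omega) (by omega), ih _ _ (by omega) (by omega)]
        · rw [solveLoop_last _ _ _ hi h1, solveLoop_last _ _ _ hi h1,
            hget i hi hlt, ih _ _ (by omega) (by omega)]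
      · rw [solveLoop_done _ _ _ hi, solveLoop_done _ _ _ hi]
  intro i r h; exact key (i+1).toNat i r le_rfl h

-- A's loop over an ascending list computes the alternating sum of its reverse
theorem solveLoop_altsum (l : List Int) : ∀ (r : Int),
    solveLoop l.reverse ((l.reverse.length : Int) - 1) r = r + altsum l := by
  induction l using altsum.induct with
  | case1 => intro r; simp [altsum, solveLoop_done]
  | case2 a =>
    intro r
    have : ([a] : List Int).reverse = [a] := rfl
    rw [this]
    rw [solveLoop_last _ _ _ (by simp) (by simp)]
    rw [solveLoop_done _ _ _ (by simp)]
    simp [altsum, PySem.List.pyGetD]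
  | case3 a b t ih =>
    intro r
    have hrev : (a :: b :: t).reverse = t.reverse ++ [b, a] := by simp
    rw [hrev]
    have hlen : ((t.reverse ++ [b, a]).length : Int) - 1 = (t.length : Int) + 1 := by simp; omega
    rw [hlen]
    rw [solveLoop_pair _ _ _ (by omega)]
    have hga : PySem.List.pyGetD (t.reverse ++ [b, a]) ((t.length : Int) + 1) 0 = a := by
      rw [PySem.List.pyGetD_eq_getElem _ _ (by omega) (by simp)]
      rw [List.getElem_append_right (by simp)]
      simp
    have hgb : PySem.List.pyGetD (t.reverse ++ [b, a]) ((t.length : Int) + 1 - 1) 0 = b := by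
      rw [PySem.List.pyGetD_eq_getElem _ _ (by omega) (by simp)]
      rw [List.getElem_append_right (by simp)]
      simp
    rw [hga, hgb]
    have htr : ((t.length : Int) + 1 - 2) = (t.reverse.length : Int) - 1 := by
      simp only [List.length_reverse]; omega
    rw [htr, solveLoop_append _ _ _ _ (by simp only [List.length_reverse]; omega), ih]
    rw [show altsum (a :: b :: t) = a - b + altsum t from rfl]
    ring

-- altsum peels one element at a time
theorem altsum_cons (x : Int) (r : List Int) : altsum (x :: r) = x - altsum r := by
  induction r using altsum.induct generalizing x with
  | case1 => simp [altsum]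
  | case2 a => show altsum [x, a] = x - altsum [a]; rw [show altsum [x, a] = x - a + altsum [] from rfl]; simp [altsum]
  | case3 a b t ih =>
    rw [show altsum (x :: a :: b :: t) = x - a + altsum (b :: t) from rfl,
        show altsum (a :: b :: t) = a - b + altsum t from rfl, ih b]
    ring

-- B's sign-flipping fold over an ascending list computes the alternating sum of its reverse
theorem foldl_flip_altsum (l : List Int) :
    l.foldl (fun acc v => v - acc) 0 = altsum l.reverse := by
  induction l using List.reverseRecOn with
  | nil => simp [altsum]
  | append_singleton t x ih =>
    rw [List.foldl_append, List.foldl_cons, List.foldl_nil, ih,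
        List.reverse_append, List.reverse_singleton, List.singleton_append, altsum_cons]

-- ===== VERDICT (by name: the statement is the Claim_ definition above) =====
theorem solve_spec : Claim_equal_solve := by
  intro values _
  unfold Spec_solve solve solve_alt
  rw [foldl_flip_altsum]
  have h := solveLoop_altsum (PySem.List.sorted values id).reverse 0
  rw [List.reverse_reverse] at h
  rw [h]
  omega
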